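-- pv_equiv track=rewrite | github.com/VishnuKumarLH/OIBSIP_Python_Programming_Task1 | nlu.py | _extract_domain_from_text
-- ===== SOURCE A (Python) =====
-- def _extract_domain_from_text(text, common_domains):
--
--     text_lower = text.lower()
--
--     # First try exact matches
--     for domain in common_domains:
--         if domain in text_lower:
--             return domain
--
--     # Try partial matches (e.g., "gmail" -> "gmail.com")
--     domain_starters = {}
--     for domain in common_domains:
--         main_part = domain.split('.')[0]
--         if main_part in domain_starters:
--             domain_starters[main_part].append(domain)
--         else:
--             domain_starters[main_part] = [domain]
--
--     for starter, domains in domain_starters.items():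
--         if starter in text_lower:
--             # Return the most common domain for this starter
--             return domains[0]  # Usually gmail.com, yahoo.com, etc.
--
--     return None
-- ===== SOURCE B (Python) =====
-- def _extract_domain_from_text(text, common_domains):
--     text_lower = text.lower()
--
--     # Single pass: return immediately on an exact substring match (which A's
--     # first phase would find), while remembering the first domain whose prefix
--     # before '.' occurs in the text as a fallback. An exact match anywhere in
--     # the list still wins over an earlier prefix-only match, exactly as in A.
--     partial = None
--     for domain in common_domains:
--         if domain in text_lower:
--             return domain
--         if partial is None and domain.split('.')[0] in text_lower:
--             partial = domain
--
--     return partial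
-- ===== Notes on version B (the rewrite author's own statement) =====
-- stated objective: simpler
-- what changed: B replaces A's three staged passes (exact-match scan, building a starter->domains dict, scanning the dict's items) with one single pass over common_domains that returns immediately on an exact match and keeps the first prefix-before-'.' match in an accumulator as a fallback; the dict disappears entirely.
import Mathlib
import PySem

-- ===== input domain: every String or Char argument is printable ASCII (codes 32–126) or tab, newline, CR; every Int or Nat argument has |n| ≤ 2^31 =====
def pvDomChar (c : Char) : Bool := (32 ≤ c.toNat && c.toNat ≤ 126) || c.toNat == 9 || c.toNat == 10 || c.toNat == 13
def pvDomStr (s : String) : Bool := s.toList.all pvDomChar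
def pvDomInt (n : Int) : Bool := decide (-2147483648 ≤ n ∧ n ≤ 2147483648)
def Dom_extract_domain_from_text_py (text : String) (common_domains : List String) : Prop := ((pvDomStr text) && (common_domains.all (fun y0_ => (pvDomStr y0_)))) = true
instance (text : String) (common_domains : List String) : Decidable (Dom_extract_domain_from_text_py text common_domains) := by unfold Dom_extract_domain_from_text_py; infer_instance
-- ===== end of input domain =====

-- B replaces A's three staged passes (exact scan, dict build, dict-items scan) with ONE pass over
-- common_domains: return on an exact match, keep the first prefix match in an accumulator (objective: simpler).

-- ===== PORT A =====
-- domain.split('.')[0]  (split? is some and nonempty for the nonempty separator ".")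
def pvAStarter (domain : String) : String :=
  ((PySem.Str.split? domain ".").getD []).headD ""

-- the first exact-match loop of A
def pvAExact (text_lower : String) : List String → Option String
  | [] => none
  | domain :: rest =>
      if PySem.Str.isIn domain text_lower then some domain else pvAExact text_lower rest

-- the domain_starters-building loop of A
def pvABuild (common_domains : List String) : PySem.Dict String (List String) :=
  common_domains.foldl
    (fun d domain =>
      let main_part := pvAStarter domain
      if d.contains main_part then d.modify main_part [] (fun l => l ++ [domain])
      else d.insert main_part [domain])
    PySem.Dict.empty

-- the loop over domain_starters.items(); domains[0] is pyGet? domains 0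
def pvAPartial (text_lower : String) : List (String × List String) → Option String
  | [] => none
  | (starter, domains) :: rest =>
      if PySem.Str.isIn starter text_lower then PySem.List.pyGet? domains 0
      else pvAPartial text_lower rest

def extract_domain_from_text_py (text : String) (common_domains : List String) : Option String :=
  let text_lower := PySem.Str.lower text
  match pvAExact text_lower common_domains with
  | some domain => some domain
  | none => pvAPartial text_lower (pvABuild common_domains).items

-- ===== PORT B =====
-- B: one pass carrying the 'partial' accumulator; exact match returns at once,
-- the first prefix match is stored only if the accumulator is still None.
def pvBLoop (text_lower : String) (partialAcc : Option String) : List String → Option String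
  | [] => partialAcc
  | domain :: rest =>
      if PySem.Str.isIn domain text_lower then some domain
      else
        pvBLoop text_lower
          (if partialAcc.isNone
              && PySem.Str.isIn (((PySem.Str.split? domain ".").getD []).headD "") text_lower
           then some domain else partialAcc) rest

def extract_domain_from_text_py_alt (text : String) (common_domains : List String) : Option String :=
  pvBLoop (PySem.Str.lower text) none common_domains

-- ===== PRECONDITION & SPEC =====
def Spec_extract_domain_from_text_py (text : String) (common_domains : List String) (out : Option String) : Prop := out = extract_domain_from_text_py_alt text common_domains
instance (text : String) (common_domains : List String) (out : Option String) : Decidable (Spec_extract_domain_from_text_py text common_domains out) := by unfold Spec_extract_domain_from_text_py; infer_instance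

-- ===== CLAIM (what is proved, stated in full; the proofs are below) =====
def Claim_equal_extract_domain_from_text_py : Prop := ∀ (text : String) (common_domains : List String), Dom_extract_domain_from_text_py text common_domains → Spec_extract_domain_from_text_py text common_domains (extract_domain_from_text_py text common_domains)

-- ===== LEMMAS AND PROOFS =====
theorem pvAExact_find (tl : String) (l : List String) :
    pvAExact tl l = l.find? (fun d => PySem.Str.isIn d tl) := by
  induction l with
  | nil => rfl
  | cons d r ih =>
      cases h : PySem.Chars.isIn d.toList tl.toList <;>
        simp [pvAExact, List.find?, PySem.Str.isIn, h, ih]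

theorem pvGet0_eq_head? {α : Type} (l : List α) : PySem.List.pyGet? l 0 = l.head? := by
  cases l <;> simp [PySem.List.pyGet?, PySem.List.pyIdx?]

-- A's items scan is find? + first element of the group
theorem pvAPartial_spec (tl : String) (l : List (String × List String)) :
    pvAPartial tl l =
      (l.find? (fun p => PySem.Str.isIn p.1 tl)).bind (fun p => PySem.List.pyGet? p.2 0) := by
  induction l with
  | nil => rfl
  | cons p r ih =>
      obtain ⟨s, g⟩ := p
      cases h : PySem.Chars.isIn s.toList tl.toList <;>
        simp [pvAPartial, List.find?, h, ih]

-- B's single pass splits into first exact match, then accumulator, then first prefix match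
theorem pvBLoop_spec (tl : String) (p : Option String) (l : List String) :
    pvBLoop tl p l =
      ((l.find? (fun d => PySem.Str.isIn d tl)).orElse (fun _ =>
        p.orElse (fun _ => l.find? (fun d => PySem.Str.isIn (pvAStarter d) tl)))) := by
  induction l generalizing p with
  | nil => cases p <;> rfl
  | cons d r ih =>
      have hstar : (((PySem.Str.split? d ".").getD []).headD "") = pvAStarter d := rfl
      simp only [pvBLoop, hstar]
      cases hx : PySem.Chars.isIn d.toList tl.toList with
      | true => simp [List.find?_cons, PySem.Str.isIn, hx, Option.orElse]
      | false =>
          cases p with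
          | some q => simp [PySem.Str.isIn, hx, ih, Option.orElse]
          | none =>
              cases hp : PySem.Chars.isIn (pvAStarter d).toList tl.toList with
              | true => simp [PySem.Str.isIn, hx, hp, ih, Option.orElse]
              | false => simp [PySem.Str.isIn, hx, hp, ih, Option.orElse]

-- the key generalized invariant for A's dict-building fold
theorem pvBuild_scan (tl : String) (ds : List String)
    (acc : PySem.Dict String (List String))
    (hnd : acc.keys.Nodup) (hne : ∀ p ∈ acc.items, p.2 ≠ []) :
    ((ds.foldl
        (fun d domain =>
          let main_part := pvAStarter domain
          if d.contains main_part then d.modify main_part [] (fun l => l ++ [domain])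
          else d.insert main_part [domain]) acc).items.find?
          (fun p => PySem.Str.isIn p.1 tl)).bind (fun p => PySem.List.pyGet? p.2 0) =
      match acc.items.find? (fun p => PySem.Str.isIn p.1 tl) with
      | some p => PySem.List.pyGet? p.2 0
      | none => ds.find? (fun d => PySem.Str.isIn (pvAStarter d) tl) := by
  induction ds generalizing acc with
  | nil =>
      simp only [List.foldl_nil]
      cases h : acc.items.find? (fun p => PySem.Str.isIn p.1 tl) <;> simp
  | cons d r ih =>
      simp only [List.foldl_cons]
      by_cases hc : acc.contains (pvAStarter d) = true
      · -- modify branch: acc.modify (st d) [] (· ++ [d]) = acc.insert (st d) v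
        rw [if_pos hc]
        set st := pvAStarter d with hst
        set v : List String := acc.getD st [] ++ [d] with hv
        set acc' := acc.modify st [] (fun l => l ++ [d]) with hacc'
        have hmi : acc' = acc.insert st v := by rw [hacc', PySem.Dict.modify]
        have hitems : acc'.items
            = acc.items.map (fun p => if p.1 == st then (st, v) else p) := by
          rw [hmi]; exact PySem.Dict.items_insert_of_contains acc v hc
        have hnd' : acc'.keys.Nodup := by
          rw [hmi]; exact PySem.Dict.nodup_keys_insert acc st v hnd
        have hne' : ∀ p ∈ acc'.items, p.2 ≠ [] := by
          intro p hp
          rw [hitems] at hp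
          obtain ⟨q, hq, rfl⟩ := List.mem_map.1 hp
          by_cases hq1 : q.1 == st
          · have hvne : v ≠ [] := by simp [hv]
            simp [hq1, hvne]
          · simpa [hq1] using hne q hq
        rw [ih _ hnd' hne']
        have hfun : ((fun p : String × List String => PySem.Str.isIn p.1 tl) ∘
            (fun p => if p.1 == st then (st, v) else p))
            = (fun p : String × List String => PySem.Str.isIn p.1 tl) := by
          funext p
          by_cases hq1 : p.1 = st
          · simp [hq1]
          · simp [hq1]
        have hfind : acc'.items.find? (fun p => PySem.Str.isIn p.1 tl)
            = (acc.items.find? (fun p => PySem.Str.isIn p.1 tl)).map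
                (fun p => if p.1 == st then (st, v) else p) := by
          rw [hitems, List.find?_map, hfun]
        cases hfa : acc.items.find? (fun p => PySem.Str.isIn p.1 tl) with
        | some p =>
            rw [hfind, hfa]
            by_cases hq1 : p.1 = st
            · have hmem : p ∈ acc.items := List.mem_of_find?_eq_some hfa
              have hget : acc.get? p.1 = some p.2 := by
                obtain ⟨p1, p2⟩ := p
                exact PySem.Dict.get?_of_mem_items acc hmem hnd
              have hgd : acc.getD st [] = p.2 := by
                rw [← hq1, PySem.Dict.getD_eq_get?_getD, hget]; rfl
              have hp2 : p.2 ≠ [] := hne p hmem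
              cases hp2' : p.2 with
              | nil => exact absurd hp2' hp2
              | cons a l =>
                  simp [hq1, hv, hgd, hp2', pvGet0_eq_head?]
            · simp [hq1]
        | none =>
            rw [hfind, hfa]
            -- the new domain's starter is an existing key, which failed the match
            have hqst : PySem.Chars.isIn st.toList tl.toList = false := by
              by_contra hq
              have hq' : PySem.Chars.isIn st.toList tl.toList = true := by
                cases hb : PySem.Chars.isIn st.toList tl.toList
                · exact absurd hb hq
                · rfl
              have hk : st ∈ acc.keys := (PySem.Dict.contains_iff_mem_keys acc st).1 hc
              have : ∃ p ∈ acc.items, p.1 = st := by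
                simpa [PySem.Dict.keys, List.mem_map] using hk
              obtain ⟨p, hp, hp1⟩ := this
              have := List.find?_eq_none.1 hfa p hp
              rw [hp1] at this
              simp only [PySem.Str.isIn] at this
              exact this hq'
            simp only [Option.map_none]
            rw [List.find?_cons]
            simp [← hst, hqst]
      · -- fresh-key insert branch
        rw [Bool.not_eq_true] at hc
        rw [if_neg (by simp [hc])]
        set st := pvAStarter d with hst
        have hitems : (acc.insert st [d]).items = acc.items ++ [(st, [d])] :=
          PySem.Dict.items_insert_of_not_contains acc [d] hc
        have hnd' : (acc.insert st [d]).keys.Nodup := PySem.Dict.nodup_keys_insert acc st [d] hnd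
        have hne' : ∀ p ∈ (acc.insert st [d]).items, p.2 ≠ [] := by
          intro p hp
          rw [hitems] at hp
          rcases List.mem_append.1 hp with h1 | h1
          · exact hne p h1
          · simp at h1; subst h1; simp
        rw [ih _ hnd' hne']
        rw [hitems, List.find?_append]
        cases hfa : acc.items.find? (fun p => PySem.Str.isIn p.1 tl) with
        | some p => simp
        | none =>
            simp only [Option.none_or]
            rw [List.find?_cons]
            cases hq : PySem.Chars.isIn st.toList tl.toList with
            | true =>
                simp only [List.find?_cons]
                simp [← hst, hq]
            | false =>
                simp only [List.find?_cons]
                simp [← hst, hq]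

-- ===== VERDICT (by name: the statement is the Claim_ definition above) =====
theorem extract_domain_from_text_py_spec : Claim_equal_extract_domain_from_text_py := by
  intro text common_domains _
  unfold Spec_extract_domain_from_text_py
  simp only [extract_domain_from_text_py, extract_domain_from_text_py_alt]
  rw [pvBLoop_spec, pvAExact_find]
  cases h : common_domains.find? (fun d => PySem.Str.isIn d (PySem.Str.lower text)) with
  | some d => simp [Option.orElse]
  | none =>
      simp only [Option.orElse]
      rw [pvAPartial_spec, pvABuild]
      rw [pvBuild_scan (PySem.Str.lower text) common_domains PySem.Dict.empty
        PySem.Dict.nodup_keys_empty (by intro p hp; simp [PySem.Dict.empty] at hp)]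
      have he : (PySem.Dict.empty : PySem.Dict String (List String)).items = [] := rfl
      simp only [he, List.find?_nil]
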